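-- pv_equiv track=rewrite | github.com/amyszczepanski/knitting_machine | app/brother_format.py | encode_row
-- ===== SOURCE A (Python) =====
-- from typing import Sequence
--
-- def _ceil4(n: int) -> int:
--     """Round n up to the nearest multiple of 4."""
--     r = n % 4
--     return n if r == 0 else n + (4 - r)
--
-- def nibbles_per_row(stitches: int) -> int:
--     """
--     Number of nibbles required to store one row of `stitches` stitches.
--     Stitch count is rounded up to the nearest multiple of 4 (nibble-aligned).
--     """
--     return _ceil4(stitches) // 4
--
-- def encode_row(pixels: Sequence[int], stitches: int) -> list[int]:
--     """
--     Encode a row of pixel values into a list of nibbles.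
--
--     `pixels` must contain exactly `stitches` values, each 0 (background/skip)
--     or 1 (selected/knit).  Dark pixels should be passed as 1.
--
--     Returns a list of nibbles (length = nibbles_per_row(stitches)).
--     Within each nibble: bit 0 = leftmost stitch, bit 3 = rightmost stitch.
--     Padding stitches (if stitches is not a multiple of 4) are filled with 0.
--     """
--     if len(pixels) != stitches:
--         raise ValueError(f"Expected {stitches} pixels for this row, got {len(pixels)}")
--     npr = nibbles_per_row(stitches)
--     nibble_list: list[int] = []
--     padded = list(pixels) + [0] * (_ceil4(stitches) - stitches)
--     for n in range(npr):
--         s = n * 4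
--         nibble = (
--             (padded[s] & 1)
--             | ((padded[s + 1] & 1) << 1)
--             | ((padded[s + 2] & 1) << 2)
--             | ((padded[s + 3] & 1) << 3)
--         )
--         nibble_list.append(nibble)
--     return nibble_list
-- ===== SOURCE B (Python) =====
-- def encode_row(pixels, stitches):
--     if len(pixels) != stitches:
--         raise ValueError(f"Expected {stitches} pixels for this row, got {len(pixels)}")
--     out = []
--     cur = 0
--     for i, p in enumerate(pixels):
--         cur |= (p & 1) << (i % 4)
--         if i % 4 == 3:
--             out.append(cur)
--             cur = 0
--     if stitches % 4 != 0:
--         out.append(cur)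
--     return out
-- ===== Notes on version B (the rewrite author's own statement) =====
-- stated objective: simpler
-- what changed: Replaced the padded-copy plus nibble-count precomputation and fourfold indexed gathering per nibble by a single enumerate pass that ORs each pixel bit into a running nibble accumulator flushed every 4 pixels (partial nibble flushed after the loop).
import Mathlib
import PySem

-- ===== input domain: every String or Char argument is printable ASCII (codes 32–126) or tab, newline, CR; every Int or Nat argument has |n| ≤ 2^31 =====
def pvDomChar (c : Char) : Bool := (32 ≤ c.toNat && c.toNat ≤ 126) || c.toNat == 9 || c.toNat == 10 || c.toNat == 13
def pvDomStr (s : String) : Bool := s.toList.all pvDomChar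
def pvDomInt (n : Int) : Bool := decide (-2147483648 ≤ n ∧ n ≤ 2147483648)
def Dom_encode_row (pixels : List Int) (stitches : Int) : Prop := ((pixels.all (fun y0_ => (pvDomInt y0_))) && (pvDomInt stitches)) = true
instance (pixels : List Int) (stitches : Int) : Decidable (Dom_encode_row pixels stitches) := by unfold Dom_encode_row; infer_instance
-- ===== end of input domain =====

-- B replaces A's padded-list + per-nibble fourfold indexing by a single enumerate pass
-- with a running nibble accumulator flushed every 4 pixels (objective: simpler decomposition).

-- ===== PORT A =====
def pvCeil4 (n : Int) : Int :=
  let r := PySem.Int.mod n 4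
  if r = 0 then n else n + (4 - r)

def pvNibblesPerRow (stitches : Int) : Int :=
  PySem.Int.floordiv (pvCeil4 stitches) 4

def encode_row (pixels : List Int) (stitches : Int) : List Int :=
  let npr := pvNibblesPerRow stitches
  let padded := pixels ++ List.replicate (pvCeil4 stitches - stitches).toNat 0
  (PySem.List.pyRange 0 npr).foldl
    (fun acc n =>
      let s := n * 4
      acc ++ [PySem.Int.bor (PySem.Int.bor (PySem.Int.bor
        (PySem.Int.band (PySem.List.pyGetD padded s 0) 1)
        (PySem.Int.band (PySem.List.pyGetD padded (s + 1) 0) 1 <<< (1 : Nat)))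
        (PySem.Int.band (PySem.List.pyGetD padded (s + 2) 0) 1 <<< (2 : Nat)))
        (PySem.Int.band (PySem.List.pyGetD padded (s + 3) 0) 1 <<< (3 : Nat))]) []

-- ===== PORT B =====
def pvStepB (st : List Int × Int) (ip : Int × Int) : List Int × Int :=
  let cur := PySem.Int.bor st.2 (PySem.Int.band ip.2 1 <<< (PySem.Int.mod ip.1 4).toNat)
  if PySem.Int.mod ip.1 4 = 3 then (st.1 ++ [cur], 0) else (st.1, cur)

def encode_row_alt (pixels : List Int) (stitches : Int) : List Int :=
  let p := (PySem.List.enumerate pixels).foldl pvStepB ([], 0)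
  if PySem.Int.mod stitches 4 ≠ 0 then p.1 ++ [p.2] else p.1

-- ===== PRECONDITION & SPEC =====
-- Pre_: the Python A raises ValueError unless len(pixels) == stitches.
def Pre_encode_row (pixels : List Int) (stitches : Int) : Prop :=
  (pixels.length : Int) = stitches
instance (pixels : List Int) (stitches : Int) : Decidable (Pre_encode_row pixels stitches) := by
  unfold Pre_encode_row; infer_instance

def pvWitness_encode_row : List Int × Int := ([1, 0, 1, 1, 0, 1], 6)

def Spec_encode_row (pixels : List Int) (stitches : Int) (out : List Int) : Prop := out = encode_row_alt pixels stitches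
instance (pixels : List Int) (stitches : Int) (out : List Int) : Decidable (Spec_encode_row pixels stitches out) := by unfold Spec_encode_row; infer_instance

-- ===== CLAIM (what is proved, stated in full; the proofs are below) =====
def Claim_equal_encode_row : Prop := ∀ (pixels : List Int) (stitches : Int), Dom_encode_row pixels stitches → Pre_encode_row pixels stitches → Spec_encode_row pixels stitches (encode_row pixels stitches)

-- ===== LEMMAS AND PROOFS =====

/-- One nibble, in the exact operator shape A builds it. -/
def pvNib (a b c d : Int) : Int :=
  PySem.Int.bor (PySem.Int.bor (PySem.Int.bor
    (PySem.Int.band a 1)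
    (PySem.Int.band b 1 <<< (1 : Nat)))
    (PySem.Int.band c 1 <<< (2 : Nat)))
    (PySem.Int.band d 1 <<< (3 : Nat))

/-- Chunk a list (whose length is a multiple of 4) into nibbles. -/
def pvPack4 : List Int → List Int
  | a :: b :: c :: d :: rest => pvNib a b c d :: pvPack4 rest
  | _ => []

/-- The zero-padded row. -/
def pvPadOf (xs : List Int) : List Int :=
  xs ++ List.replicate ((4 - xs.length % 4) % 4) 0

lemma pv_zero_bor (x : Int) : PySem.Int.bor 0 x = x := by
  rw [PySem.Int.bor_comm]; exact PySem.Int.bor_zero x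

lemma pv_zero_band (x : Int) : PySem.Int.band 0 x = 0 := by
  rw [PySem.Int.band_comm]; exact PySem.Int.band_zero x

lemma pv_mod4_add (i : Int) : PySem.Int.mod (i + 4) 4 = PySem.Int.mod i 4 := by
  simp only [PySem.Int.mod_eq_emod_of_pos (b := 4) (by omega)]
  omega

lemma pv_toNat2 : (2 : Int).toNat = 2 := rfl

lemma pv_toNat3 : (3 : Int).toNat = 3 := rfl

lemma pv_getD_cast (ys : List Int) (m : Nat) :
    PySem.List.pyGetD ys ((m : Int)) 0 = ys.getD m 0 := PySem.List.pyGetD_natCast ys m 0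

lemma pv_padOf_cons4 (a b c d : Int) (rest : List Int) :
    pvPadOf (a :: b :: c :: d :: rest) = a :: b :: c :: d :: pvPadOf rest := by
  simp only [pvPadOf, List.cons_append, List.length_cons]
  rw [show (4 - (rest.length + 1 + 1 + 1 + 1) % 4) % 4 = (4 - rest.length % 4) % 4 by omega]

lemma pv_padded_eq (xs : List Int) :
    xs ++ List.replicate (pvCeil4 (xs.length : Int) - (xs.length : Int)).toNat 0 = pvPadOf xs := by
  unfold pvPadOf
  congr 2
  simp only [pvCeil4, PySem.Int.mod_eq_emod_of_pos (b := 4) (by omega)]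
  split_ifs with h <;> omega

lemma pv_npr_toNat (L : Nat) : (pvNibblesPerRow (L : Int)).toNat = (L + 3) / 4 := by
  simp only [pvNibblesPerRow, pvCeil4, PySem.Int.mod_eq_emod_of_pos (b := 4) (by omega),
    PySem.Int.floordiv_eq_ediv_of_pos (b := 4) (by omega)]
  split_ifs with h <;> omega

lemma pv_padOf_len (xs : List Int) : (pvPadOf xs).length = 4 * ((xs.length + 3) / 4) := by
  simp only [pvPadOf, List.length_append, List.length_replicate]
  omega

lemma pv_map_nib_eq_pack4 : ∀ (K : Nat) (ys : List Int), ys.length = 4 * K →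
    (List.range K).map (fun n =>
      pvNib (ys.getD (4 * n) 0) (ys.getD (4 * n + 1) 0) (ys.getD (4 * n + 2) 0) (ys.getD (4 * n + 3) 0))
      = pvPack4 ys := by
  intro K
  induction K with
  | zero =>
    intro ys h
    have : ys = [] := List.length_eq_zero_iff.mp (by omega)
    subst this; simp [pvPack4]
  | succ K ih =>
    intro ys h
    rcases ys with _ | ⟨a, _ | ⟨b, _ | ⟨c, _ | ⟨d, rest⟩⟩⟩⟩
    all_goals simp only [List.length_cons, List.length_nil] at h
    all_goals try omega
    rw [List.range_succ_eq_map]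
    simp only [List.map_cons, List.map_map]
    rw [show pvPack4 (a :: b :: c :: d :: rest) = pvNib a b c d :: pvPack4 rest from rfl]
    congr 1
    · rw [← ih rest (by omega)]
      apply List.map_congr_left
      intro n _
      simp [Function.comp, List.getD, show 4 * Nat.succ n = 4*n+1+1+1+1 from by omega,
        List.getElem?_cons_succ]

lemma pv_mainA (xs : List Int) :
    encode_row xs (xs.length : Int) = pvPack4 (pvPadOf xs) := by
  unfold encode_row
  rw [PySem.List.foldl_append_singleton_eq_map]
  rw [pv_padded_eq, PySem.List.pyRange_one, List.map_map, List.nil_append]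
  rw [show ((pvNibblesPerRow ((xs.length : Nat) : Int)) - 0).toNat = (xs.length + 3)/4 by
        rw [Int.sub_zero, pv_npr_toNat]]
  rw [← pv_map_nib_eq_pack4 ((xs.length + 3)/4) (pvPadOf xs) (pv_padOf_len xs)]
  apply List.map_congr_left
  intro n _
  simp only [Function.comp_apply, zero_add]
  rw [show ((n : Int)) * 4 = ((4 * n : Nat) : Int) by push_cast; ring]
  rw [show ((4 * n : Nat) : Int) + 1 = ((4 * n + 1 : Nat) : Int) by push_cast; ring]
  rw [show ((4 * n : Nat) : Int) + 2 = ((4 * n + 2 : Nat) : Int) by push_cast; ring]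
  rw [show ((4 * n : Nat) : Int) + 3 = ((4 * n + 3 : Nat) : Int) by push_cast; ring]
  rw [pv_getD_cast, pv_getD_cast, pv_getD_cast, pv_getD_cast]
  rfl

lemma pv_foldB_shift : ∀ (xs : List Int) (st : List Int × Int) (i : Int),
    (PySem.List.enumerate xs (i + 4)).foldl pvStepB st = (PySem.List.enumerate xs i).foldl pvStepB st := by
  intro xs
  induction xs with
  | nil => intro st i; simp [PySem.List.enumerate_nil]
  | cons x xs ih =>
    intro st i
    rw [PySem.List.enumerate_cons, PySem.List.enumerate_cons, List.foldl_cons, List.foldl_cons]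
    have hstep : pvStepB st (i + 4, x) = pvStepB st (i, x) := by
      unfold pvStepB; rw [pv_mod4_add]
    rw [hstep, show i + 4 + 1 = (i + 1) + 4 by ring, ih]

lemma pv_foldB_out : ∀ (l : List (Int × Int)) (out : List Int) (c : Int),
    l.foldl pvStepB (out, c)
      = (out ++ (l.foldl pvStepB ([], c)).1, (l.foldl pvStepB ([], c)).2) := by
  intro l
  induction l with
  | nil => intro out c; simp
  | cons p l ih =>
    intro out c
    rw [List.foldl_cons, List.foldl_cons]
    by_cases h : PySem.Int.mod p.1 4 = 3
    · rw [show pvStepB (out, c) p = (out ++ [PySem.Int.bor c (PySem.Int.band p.2 1 <<< (PySem.Int.mod p.1 4).toNat)], 0) from by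
          simp only [pvStepB]; rw [if_pos h]]
      rw [show pvStepB (([] : List Int), c) p = ([PySem.Int.bor c (PySem.Int.band p.2 1 <<< (PySem.Int.mod p.1 4).toNat)], 0) from by
          simp only [pvStepB]; rw [if_pos h]; rw [List.nil_append]]
      rw [ih, ih ([PySem.Int.bor c (PySem.Int.band p.2 1 <<< (PySem.Int.mod p.1 4).toNat)]) 0]
      simp
    · rw [show pvStepB (out, c) p = (out, PySem.Int.bor c (PySem.Int.band p.2 1 <<< (PySem.Int.mod p.1 4).toNat)) from by
          simp only [pvStepB]; rw [if_neg h]]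
      rw [show pvStepB (([] : List Int), c) p = ([], PySem.Int.bor c (PySem.Int.band p.2 1 <<< (PySem.Int.mod p.1 4).toNat)) from by
          simp only [pvStepB]; rw [if_neg h]]
      rw [ih]

lemma pv_mainB (xs : List Int) :
    encode_row_alt xs (xs.length : Int) = pvPack4 (pvPadOf xs) := by
  have key : ∀ (n : Nat) (xs : List Int), xs.length ≤ n →
      encode_row_alt xs (xs.length : Int) = pvPack4 (pvPadOf xs) := by
    intro n
    induction n with
    | zero =>
      intro xs h
      have hx : xs = [] := List.length_eq_zero_iff.mp (by omega)
      subst hx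
      norm_num [encode_row_alt, PySem.List.enumerate_nil, pvPack4, pvPadOf,
        PySem.Int.mod_eq_emod_of_pos (show (0:Int) < 4 by norm_num)]
    | succ n ih =>
      intro xs h
      rcases xs with _ | ⟨a, _ | ⟨b, _ | ⟨c, _ | ⟨d, rest⟩⟩⟩⟩
      · norm_num [encode_row_alt, PySem.List.enumerate_nil, pvPack4, pvPadOf,
          PySem.Int.mod_eq_emod_of_pos (show (0:Int) < 4 by norm_num)]
      · norm_num [encode_row_alt, PySem.List.enumerate_cons, PySem.List.enumerate_nil, pvStepB,
          PySem.Int.mod_eq_emod_of_pos (show (0:Int) < 4 by norm_num), pvPack4, pvPadOf, pvNib,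
          pv_zero_bor, pv_zero_band, Int.zero_shiftLeft, Int.shiftLeft_zero, pv_toNat2, pv_toNat3,
          List.replicate_succ, List.replicate_zero, PySem.Int.bor_zero, PySem.Int.band_zero]
      · norm_num [encode_row_alt, PySem.List.enumerate_cons, PySem.List.enumerate_nil, pvStepB,
          PySem.Int.mod_eq_emod_of_pos (show (0:Int) < 4 by norm_num), pvPack4, pvPadOf, pvNib,
          pv_zero_bor, pv_zero_band, Int.zero_shiftLeft, Int.shiftLeft_zero, pv_toNat2, pv_toNat3,
          List.replicate_succ, List.replicate_zero, PySem.Int.bor_zero, PySem.Int.band_zero]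
      · norm_num [encode_row_alt, PySem.List.enumerate_cons, PySem.List.enumerate_nil, pvStepB,
          PySem.Int.mod_eq_emod_of_pos (show (0:Int) < 4 by norm_num), pvPack4, pvPadOf, pvNib,
          pv_zero_bor, pv_zero_band, Int.zero_shiftLeft, Int.shiftLeft_zero, pv_toNat2, pv_toNat3,
          List.replicate_succ, List.replicate_zero, PySem.Int.bor_zero, PySem.Int.band_zero]
      · -- a :: b :: c :: d :: rest
        have hpre : (PySem.List.enumerate (a :: b :: c :: d :: rest)).foldl pvStepB ([], 0)
            = (PySem.List.enumerate rest 4).foldl pvStepB ([pvNib a b c d], 0) := by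
          norm_num [PySem.List.enumerate_cons, pvStepB, pvNib,
            PySem.Int.mod_eq_emod_of_pos (show (0:Int) < 4 by norm_num),
            pv_zero_bor, Int.shiftLeft_zero, pv_toNat2, pv_toNat3]
        have hshift : (PySem.List.enumerate rest (4 : Int)).foldl pvStepB ([pvNib a b c d], 0)
            = (PySem.List.enumerate rest 0).foldl pvStepB ([pvNib a b c d], 0) := by
          rw [show (4 : Int) = 0 + 4 by ring, pv_foldB_shift]
        have hcond : (PySem.Int.mod (((a :: b :: c :: d :: rest).length : Nat) : Int) 4 ≠ 0)
            ↔ (PySem.Int.mod ((rest.length : Nat) : Int) 4 ≠ 0) := by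
          simp only [List.length_cons,
            PySem.Int.mod_eq_emod_of_pos (show (0:Int) < 4 by norm_num)]
          constructor <;> (intro hh; push_cast at *; omega)
        simp only [encode_row_alt, hpre, hshift, pv_foldB_out (PySem.List.enumerate rest 0) [pvNib a b c d] 0]
        rw [pv_padOf_cons4]
        rw [show pvPack4 (a :: b :: c :: d :: pvPadOf rest) = pvNib a b c d :: pvPack4 (pvPadOf rest) from rfl]
        rw [← ih rest (by simp at h; omega)]
        simp only [encode_row_alt]
        by_cases hc : PySem.Int.mod ((rest.length : Nat) : Int) 4 ≠ 0
        · rw [if_pos (hcond.mpr hc), if_pos hc]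
          simp
        · rw [if_neg (by simpa using (fun hh => hc (hcond.mp hh))), if_neg hc]
          simp
  exact key xs.length xs le_rfl

-- ===== VERDICT (by name: the statement is the Claim_ definition above) =====
theorem encode_row_spec : Claim_equal_encode_row := by
  intro pixels stitches _ hpre
  unfold Spec_encode_row
  rw [← hpre, pv_mainA, pv_mainB]
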